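-- pv_equiv track=rewrite | github.com/francosorbello/Python-Can | TP3/6-T800.py | repetido
-- ===== SOURCE A (Python) =====
-- def repetido(lista):
--     #busca elementos repetidos en una lista
--     n=len(lista)
--     for i in range(0,n):
--         for j in range(0,n):
--             if lista[i]==lista[j] and i!=j:
--                 return True
--             if lista[j]==(j+1):
--                 #tambien busca volver a ciudades anteriores.
--                 #Ej:si A=[0,2,1,3], la pos 1,2 es igual a la 2,1.
--                 return True
--     return False
-- ===== SOURCE B (Python) =====
-- def repetido(lista):
--     # Linear scan: element equal to its 1-based position.
--     for i, x in enumerate(lista):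
--         if x == i + 1:
--             return True
--     # Duplicate detection: sort once, scan adjacent pairs.
--     s = sorted(lista)
--     for a, b in zip(s, s[1:]):
--         if a == b:
--             return True
--     return False
-- ===== Notes on version B (the rewrite author's own statement) =====
-- stated objective: faster
-- what changed: Replaced A's O(n^2) nested pairwise scan with one enumerate pass for the element==index+1 check plus sort-then-adjacent-scan for duplicate detection.
import Mathlib
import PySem

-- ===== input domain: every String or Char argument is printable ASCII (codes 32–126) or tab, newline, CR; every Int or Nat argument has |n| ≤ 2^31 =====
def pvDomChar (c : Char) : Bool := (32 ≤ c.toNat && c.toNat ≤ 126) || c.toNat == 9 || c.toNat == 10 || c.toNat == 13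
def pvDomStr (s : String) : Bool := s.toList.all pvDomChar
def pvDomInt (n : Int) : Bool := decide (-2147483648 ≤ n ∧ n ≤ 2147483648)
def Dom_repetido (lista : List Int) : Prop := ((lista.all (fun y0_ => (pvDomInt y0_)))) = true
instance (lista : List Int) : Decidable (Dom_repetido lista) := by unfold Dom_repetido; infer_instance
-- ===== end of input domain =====

-- B replaces A's quadratic nested pairwise scan by an enumerate pass (element == index+1)
-- plus a sort-then-adjacent-pair scan for duplicates (objective: faster).

-- ===== PORT A =====
-- Nested index loops; the two early 'return True' branches become disjuncts of the 'any' body.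
def repetido (lista : List Int) : Bool :=
  let n : Int := lista.length
  (PySem.List.pyRange 0 n 1).any (fun i =>
    (PySem.List.pyRange 0 n 1).any (fun j =>
      (PySem.List.pyGetD lista i 0 == PySem.List.pyGetD lista j 0 && !(i == j))
      || (PySem.List.pyGetD lista j 0 == j + 1)))

-- ===== PORT B =====
def repetido_alt (lista : List Int) : Bool :=
  if (PySem.List.enumerate lista 0).any (fun p => p.2 == p.1 + 1) then true
  else
    let s := PySem.List.sorted lista (fun x => x) false
    (s.zip s.tail).any (fun p => p.1 == p.2)

-- ===== PRECONDITION & SPEC =====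
def Spec_repetido (lista : List Int) (out : Bool) : Prop := out = repetido_alt lista
instance (lista : List Int) (out : Bool) : Decidable (Spec_repetido lista out) := by unfold Spec_repetido; infer_instance

-- ===== CLAIM (what is proved, stated in full; the proofs are below) =====
def Claim_equal_repetido : Prop := ∀ (lista : List Int), Dom_repetido lista → Spec_repetido lista (repetido lista)

-- ===== LEMMAS AND PROOFS =====

-- the common characterisation: some duplicated element, or an element equal to its index + 1
def pvP (l : List Int) : Prop :=
  (¬ l.Nodup) ∨ (∃ k : Nat, k < l.length ∧ l.getD k 0 = (k : Int) + 1)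

-- on a ≤-sorted list, an equal adjacent pair is exactly a failure of Nodup
lemma adj_any_eq (s : List Int) (h : s.Pairwise (· ≤ ·)) :
    ((s.zip s.tail).any (fun p => p.1 == p.2) = true) ↔ ¬ s.Nodup := by
  induction s with
  | nil => simp
  | cons a t ih =>
    cases t with
    | nil => simp
    | cons b u =>
      rcases List.pairwise_cons.mp h with ⟨hab, ht⟩
      by_cases hab' : a = b
      · subst hab'
        simp [List.any_cons]
      · have ha : a ∉ b :: u := by
          intro hmem
          rcases List.mem_cons.mp hmem with rfl | hmem
          · exact hab' rfl
          · exact hab' (le_antisymm (hab b (by simp))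
              ((List.pairwise_cons.mp ht).1 a hmem))
        have hb : (a == b) = false := by simp [hab']
        rw [List.tail_cons] at ih
        rw [show (a :: b :: u).tail = b :: u from rfl, List.zip_cons_cons,
          List.any_cons, hb, Bool.false_or, ih ht]
        simp [List.nodup_cons, ha]

lemma enum_any_iff (l : List Int) (s : Int) :
    ((PySem.List.enumerate l s).any (fun p => p.2 == p.1 + 1) = true)
      ↔ (∃ k : Nat, k < l.length ∧ l.getD k 0 = s + (k : Int) + 1) := by
  induction l generalizing s with
  | nil => simp [PySem.List.enumerate_nil]
  | cons x t ih =>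
    rw [PySem.List.enumerate_cons, List.any_cons, Bool.or_eq_true, ih (s + 1)]
    constructor
    · rintro (hx | ⟨k, hk, hv⟩)
      · exact ⟨0, by simp, by simpa using (beq_iff_eq.mp hx)⟩
      · refine ⟨k + 1, by simpa using hk, ?_⟩
        push_cast
        have : s + 1 + (k:Int) + 1 = s + ((k:Int) + 1) + 1 := by ring
        rw [← this]
        simpa [List.getD] using hv
    · rintro ⟨k, hk, hv⟩
      cases k with
      | zero => exact Or.inl (by simpa using hv)
      | succ k =>
        refine Or.inr ⟨k, by simpa using hk, ?_⟩
        push_cast at hv ⊢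
        have : s + ((k:Int) + 1) + 1 = s + 1 + (k:Int) + 1 := by ring
        rw [← this]
        simpa [List.getD] using hv

lemma repetido_iff' (l : List Int) :
    ((PySem.List.pyRange 0 (l.length : Int) 1).any (fun i =>
      (PySem.List.pyRange 0 (l.length : Int) 1).any (fun j =>
        (PySem.List.pyGetD l i 0 == PySem.List.pyGetD l j 0 && !(i == j))
        || (PySem.List.pyGetD l j 0 == j + 1))) = true) ↔ pvP l := by
  simp only [List.any_eq_true, PySem.List.mem_pyRange_one, Bool.or_eq_true,
    Bool.and_eq_true, beq_iff_eq, Bool.not_eq_eq_eq_not, Bool.not_true, beq_eq_false_iff_ne,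
    ne_eq]
  constructor
  · rintro ⟨i, ⟨hi0, hin⟩, j, ⟨hj0, hjn⟩, hcase⟩
    rcases hcase with ⟨heq, hne⟩ | hj
    · left
      intro hnd
      rw [PySem.List.pyGetD_eq_getElem l 0 hi0 hin, PySem.List.pyGetD_eq_getElem l 0 hj0 hjn] at heq
      have := (List.Nodup.getElem_inj_iff hnd).mp heq
      omega
    · right
      refine ⟨j.toNat, by omega, ?_⟩
      rw [PySem.List.pyGetD_eq_getElem l 0 hj0 hjn] at hj
      rw [List.getD_eq_getElem l 0 (by omega)]
      rw [hj]
      omega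
  · rintro (hnd | ⟨k, hk, hv⟩)
    · rw [List.nodup_iff_injective_get] at hnd
      rcases Function.not_injective_iff.mp hnd with ⟨p, q, hpq, hne⟩
      refine ⟨(p : Nat), ⟨by omega, by exact_mod_cast p.isLt⟩,
        (q : Nat), ⟨by omega, by exact_mod_cast q.isLt⟩, Or.inl ⟨?_, ?_⟩⟩
      · rw [PySem.List.pyGetD_natCast l p 0, PySem.List.pyGetD_natCast l q 0]
        simp only [List.getD_eq_getElem l 0 p.isLt, List.getD_eq_getElem l 0 q.isLt]
        simpa [List.get_eq_getElem] using hpq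
      · intro h
        exact hne (Fin.ext (by exact_mod_cast h))
    · refine ⟨(k : Nat), ⟨by omega, by exact_mod_cast hk⟩,
        (k : Nat), ⟨by omega, by exact_mod_cast hk⟩, Or.inr ?_⟩
      rw [PySem.List.pyGetD_natCast l k 0]
      exact hv

lemma repetido_alt_iff (l : List Int) : repetido_alt l = true ↔ pvP l := by
  unfold repetido_alt
  have henum : ((PySem.List.enumerate l 0).any (fun p => p.2 == p.1 + 1) = true)
      ↔ (∃ k : Nat, k < l.length ∧ l.getD k 0 = (k : Int) + 1) := by
    rw [enum_any_iff l 0]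
    simp
  by_cases hc : (PySem.List.enumerate l 0).any (fun p => p.2 == p.1 + 1) = true
  · simp only [hc, if_true]
    exact ⟨fun _ => Or.inr (henum.mp hc), fun _ => by simp⟩
  · simp only [Bool.not_eq_true] at hc
    simp only [hc, Bool.false_eq_true, if_false]
    have hpair : (PySem.List.sorted l (fun x => x) false).Pairwise (· ≤ ·) :=
      PySem.List.sorted_pairwise l (fun x => x)
    rw [adj_any_eq _ hpair,
      List.Perm.nodup_iff (PySem.List.sorted_perm l (fun x => x) false)]
    have hno : ¬ (∃ k : Nat, k < l.length ∧ l.getD k 0 = (k : Int) + 1) := by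
      rw [← henum, hc]; simp
    unfold pvP
    constructor
    · exact fun h => Or.inl h
    · rintro (h | h)
      · exact h
      · exact absurd h hno

-- ===== VERDICT (by name: the statement is the Claim_ definition above) =====
theorem repetido_spec : Claim_equal_repetido := by
  intro lista _
  unfold Spec_repetido repetido
  rw [Bool.eq_iff_iff, repetido_iff', repetido_alt_iff]
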